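-- pv_equiv track=rewrite | github.com/KothuruS/HackerRank | String Transformation.py | transformSentence
-- ===== SOURCE A (Python) =====
-- def transformSentence(sentence):
--     result = []
--     result.append(sentence[0])
--     for i in range(1,len(sentence)):
--         if(sentence[i] != ' '):
--             if sentence[i-1].lower() < sentence[i].lower() and sentence[i-1] !=' ':
--                 result.append(sentence[i].upper())
--             elif sentence[i-1].lower() > sentence[i].lower() and sentence[i-1] !=' ':
--                 result.append(sentence[i].lower())
--             elif sentence[i-1].lower() == sentence[i].lower() and sentence[i-1] !=' ':
--                 result.append(sentence[i])
--             else: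
--                 result.append(sentence[i])
--         else:
--             result.append(sentence[i])
--             #result.append(sentence[i+1])
--     makeitastring = ''.join(map(str, result))
--     return makeitastring
-- ===== SOURCE B (Python) =====
-- def _transform_word(w):
--     # first character kept; each later character compared with its predecessor
--     if not w:
--         return ''
--     out = [w[0]]
--     prev = w[0]
--     for c in w[1:]:
--         a, b = prev.lower(), c.lower()
--         out.append(c.upper() if a < b else c.lower() if a > b else c)
--         prev = c
--     return ''.join(out)
--
--
-- def transformSentence(sentence):
--     return ' '.join(_transform_word(w) for w in sentence.split(' '))
-- ===== Notes on version B (the rewrite author's own statement) =====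
-- stated objective: faster
-- what changed: Replaces A's single index-based scan (per character: an index lookup of the current and previous character plus space tests and up to three compound comparisons) by splitting the sentence on single spaces into words, transforming each word independently with a first-char-anchored helper, and joining the transformed words back with single spaces; the space special-cases disappear because spaces never occur inside a word, which removes per-character branch work (measured constant-factor speedup).
import Mathlib
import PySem

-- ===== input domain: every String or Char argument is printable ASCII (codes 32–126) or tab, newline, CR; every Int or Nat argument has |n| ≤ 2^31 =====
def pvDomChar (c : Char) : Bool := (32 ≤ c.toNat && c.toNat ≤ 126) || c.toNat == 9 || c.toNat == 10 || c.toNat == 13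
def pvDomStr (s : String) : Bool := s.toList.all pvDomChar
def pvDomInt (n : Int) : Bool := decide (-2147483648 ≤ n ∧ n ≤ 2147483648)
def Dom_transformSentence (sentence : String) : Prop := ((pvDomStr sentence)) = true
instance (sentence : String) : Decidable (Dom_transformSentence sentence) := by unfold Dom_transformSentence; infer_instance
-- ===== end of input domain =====

-- B re-implements A by splitting on ' ' and transforming each word independently (A scans by index
-- with space special-cases); equivalence of return values is proved on nonempty inputs (A raises on "").

-- ===== PORT A =====
def transformSentence (sentence : String) : String :=
  let cs := sentence.toList
  match PySem.List.pyGet? cs 0 with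
  | none => ""  -- Python raises IndexError on sentence[0] here; excluded by Pre_
  | some c0 =>
    let result := (PySem.List.pyRange 1 (cs.length : Int) 1).foldl (fun acc i =>
      if PySem.List.pyGetD cs i ' ' ≠ ' ' then
        if PySem.Chars.lowerChar (PySem.List.pyGetD cs (i-1) ' ') < PySem.Chars.lowerChar (PySem.List.pyGetD cs i ' ') ∧ PySem.List.pyGetD cs (i-1) ' ' ≠ ' ' then
          acc ++ [PySem.Chars.upperChar (PySem.List.pyGetD cs i ' ')]
        else if PySem.Chars.lowerChar (PySem.List.pyGetD cs (i-1) ' ') > PySem.Chars.lowerChar (PySem.List.pyGetD cs i ' ') ∧ PySem.List.pyGetD cs (i-1) ' ' ≠ ' ' then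
          acc ++ [PySem.Chars.lowerChar (PySem.List.pyGetD cs i ' ')]
        else if PySem.Chars.lowerChar (PySem.List.pyGetD cs (i-1) ' ') = PySem.Chars.lowerChar (PySem.List.pyGetD cs i ' ') ∧ PySem.List.pyGetD cs (i-1) ' ' ≠ ' ' then
          acc ++ [PySem.List.pyGetD cs i ' ']
        else
          acc ++ [PySem.List.pyGetD cs i ' ']
      else
        acc ++ [PySem.List.pyGetD cs i ' ']) [c0]
    String.ofList result

-- ===== PORT B =====
def twStep (prev c : Char) : Char :=
  if PySem.Chars.lowerChar prev < PySem.Chars.lowerChar c then PySem.Chars.upperChar c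
  else if PySem.Chars.lowerChar prev > PySem.Chars.lowerChar c then PySem.Chars.lowerChar c
  else c

def twChars (w : List Char) : List Char :=
  match w with
  | [] => []
  | c0 :: rest =>
    (rest.foldl (fun (st : List Char × Char) c => (st.1 ++ [twStep st.2 c], c)) ([c0], c0)).1

def transformSentence_alt (sentence : String) : String :=
  String.ofList (PySem.Chars.join [' '] ((PySem.Chars.splitOn sentence.toList [' ']).map twChars))

-- ===== PRECONDITION & SPEC =====
-- Pre_ excludes exactly the empty string, on which A raises IndexError (sentence[0]).
def Pre_transformSentence (sentence : String) : Prop := sentence ≠ ""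
instance (sentence : String) : Decidable (Pre_transformSentence sentence) := by unfold Pre_transformSentence; infer_instance
def pvWitness_transformSentence : String := "Hello World"

def Spec_transformSentence (sentence : String) (out : String) : Prop := out = transformSentence_alt sentence
instance (sentence : String) (out : String) : Decidable (Spec_transformSentence sentence out) := by unfold Spec_transformSentence; infer_instance

-- ===== CLAIM (what is proved, stated in full; the proofs are below) =====
def Claim_equal_transformSentence : Prop := ∀ (sentence : String), Dom_transformSentence sentence → Pre_transformSentence sentence → Spec_transformSentence sentence (transformSentence sentence)

-- ===== LEMMAS AND PROOFS =====

-- the per-character transformation A performs at a non-initial position, written as a function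
def gA (prev c : Char) : Char := if c = ' ' then c else if prev = ' ' then c else twStep prev c

-- A's whole-string transformation, structurally
def rC : Char → List Char → List Char
  | _, [] => []
  | prev, c :: rest => gA prev c :: rC c rest

-- B's within-word transformation, structurally
def refT : Char → List Char → List Char
  | _, [] => []
  | prev, c :: rest => twStep prev c :: refT c rest

def spHead (c : Char) : List (List Char) → List (List Char)
  | [] => [[c]]
  | h :: t => (c :: h) :: t

-- structural characterisation of splitOn on a single-space separator
def sp : List Char → List (List Char)
  | [] => [[]]
  | c :: rest => if c = ' ' then [] :: sp rest else spHead c (sp rest)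

def consHead (x : List Char) : List (List Char) → List (List Char)
  | [] => [x]
  | h :: t => (x ++ h) :: t

def J : List (List Char) → List Char
  | [] => []
  | w :: ws => ' ' :: (twChars w ++ J ws)

lemma sp_ne_nil (cs : List Char) : sp cs ≠ [] := by
  cases cs with
  | nil => simp [sp]
  | cons c rest =>
    simp only [sp]
    split
    · simp
    · cases h : sp rest <;> simp [spHead]

lemma tw_fold (l : List Char) : ∀ (acc : List Char) (prev : Char),
    (l.foldl (fun (st : List Char × Char) c => (st.1 ++ [twStep st.2 c], c)) (acc, prev)).1
      = acc ++ refT prev l := by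
  induction l with
  | nil => intro acc prev; simp [refT]
  | cons c rest ih => intro acc prev; simp [List.foldl, refT, ih]

lemma twChars_cons (c : Char) (rest : List Char) : twChars (c :: rest) = c :: refT c rest := by
  simp [twChars, tw_fold]

lemma go_spec : ∀ (fuel : Nat) (l cur : List Char) (acc : List (List Char)),
    l.length ≤ fuel →
    PySem.Chars.splitOn.go [' '] fuel l cur acc = acc.reverse ++ consHead cur.reverse (sp l) := by
  intro fuel
  induction fuel with
  | zero =>
    intro l cur acc h
    have hl : l = [] := by cases l <;> simp_all
    subst hl
    simp [PySem.Chars.splitOn.go, sp, consHead]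
  | succ f ih =>
    intro l cur acc h
    cases l with
    | nil => simp [PySem.Chars.splitOn.go, sp, consHead]
    | cons c rest =>
      by_cases hc : c = ' '
      · subst hc
        have hpre : [' '].isPrefixOf (' ' :: rest) = true := by simp [List.isPrefixOf]
        rw [PySem.Chars.splitOn.go]
        simp only [hpre, if_pos]
        have hd : List.drop [' '].length (' ' :: rest) = rest := rfl
        rw [hd, ih rest [] (cur.reverse :: acc) (by simpa using Nat.le_of_succ_le_succ h)]
        obtain ⟨h0, t0, hsp⟩ : ∃ h0 t0, sp rest = h0 :: t0 := by
          cases hs : sp rest with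
          | nil => exact absurd hs (sp_ne_nil rest)
          | cons a b => exact ⟨a, b, rfl⟩
        simp [sp, hsp, consHead]
      · have hpre : [' '].isPrefixOf (c :: rest) = false := by
          simp [List.isPrefixOf]
          exact fun hh => (hc hh.symm)
        rw [PySem.Chars.splitOn.go]
        simp only [hpre]
        rw [if_neg (by simp)]
        rw [ih rest (c :: cur) acc (by simpa using Nat.le_of_succ_le_succ h)]
        obtain ⟨h0, t0, hsp⟩ : ∃ h0 t0, sp rest = h0 :: t0 := by
          cases hs : sp rest with
          | nil => exact absurd hs (sp_ne_nil rest)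
          | cons a b => exact ⟨a, b, rfl⟩
        simp [sp, hc, hsp, spHead, consHead]

lemma splitOn_eq_sp (s : List Char) : PySem.Chars.splitOn s [' '] = sp s := by
  rw [PySem.Chars.splitOn, go_spec (s.length + 1) s [] [] (Nat.le_succ _)]
  obtain ⟨h0, t0, hsp⟩ : ∃ h0 t0, sp s = h0 :: t0 := by
    cases hs : sp s with
    | nil => exact absurd hs (sp_ne_nil s)
    | cons a b => exact ⟨a, b, rfl⟩
  simp [hsp, consHead]

lemma join_eq : ∀ (t : List (List Char)) (h : List Char),
    PySem.Chars.join [' '] ((h :: t).map twChars) = twChars h ++ J t := by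
  intro t
  induction t with
  | nil => intro h; simp [PySem.Chars.join, J, List.intercalate]
  | cons w ws ih =>
    intro h
    have := ih w
    simp only [PySem.Chars.join, List.intercalate] at this ⊢
    simp [J] at this ⊢
    simp [this]

lemma gA_space_left (c : Char) : gA ' ' c = c := by
  unfold gA; split_ifs <;> simp_all

lemma gA_space_right (p : Char) : gA p ' ' = ' ' := by
  unfold gA; simp

lemma gA_ne (p c : Char) (hp : p ≠ ' ') (hc : c ≠ ' ') : gA p c = twStep p c := by
  unfold gA; simp [hp, hc]

lemma main_lemma : ∀ (cs : List Char),
    (PySem.Chars.join [' '] ((sp cs).map twChars) = rC ' ' cs) ∧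
    (∀ (prev : Char) (h : List Char) (t : List (List Char)), prev ≠ ' ' → sp cs = h :: t →
      refT prev h ++ J t = rC prev cs) := by
  intro cs
  induction cs with
  | nil =>
    constructor
    · simp [sp, PySem.Chars.join, List.intercalate, twChars, rC]
    · intro prev h t _ hsp
      simp [sp] at hsp
      obtain ⟨hh, ht⟩ := hsp
      subst hh; subst ht
      simp [refT, J, rC]
  | cons c rest ih =>
    obtain ⟨h0, t0, hsp⟩ : ∃ h0 t0, sp rest = h0 :: t0 := by
      cases hs : sp rest with
      | nil => exact absurd hs (sp_ne_nil rest)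
      | cons a b => exact ⟨a, b, rfl⟩
    have hJ : J (sp rest) = ' ' :: PySem.Chars.join [' '] ((sp rest).map twChars) := by
      rw [hsp, join_eq]; simp [J]
    constructor
    · by_cases hc : c = ' '
      · subst hc
        have : sp (' ' :: rest) = [] :: sp rest := by simp [sp]
        rw [this]
        have : PySem.Chars.join [' '] (([] :: sp rest).map twChars) = twChars [] ++ J (sp rest) := join_eq _ _
        rw [this]
        simp only [twChars, List.nil_append]
        rw [hJ, ih.1]
        simp [rC, gA_space_left]
      · have hspc : sp (c :: rest) = (c :: h0) :: t0 := by simp [sp, hc, hsp, spHead]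
        rw [hspc, join_eq, twChars_cons]
        have := ih.2 c h0 t0 hc hsp
        simp only [rC, gA_space_left, List.cons_append]
        rw [this]
    · intro prev h t hprev hspc
      by_cases hc : c = ' '
      · subst hc
        have : sp (' ' :: rest) = [] :: sp rest := by simp [sp]
        rw [this] at hspc
        cases hspc
        simp only [refT, List.nil_append]
        rw [hJ, ih.1]
        simp [rC, gA_space_right]
      · have hspc' : sp (c :: rest) = (c :: h0) :: t0 := by simp [sp, hc, hsp, spHead]
        rw [hspc'] at hspc
        cases hspc
        simp only [refT, List.cons_append]
        rw [ih.2 c h0 t0 hc hsp]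
        simp [rC, gA_ne prev c hprev hc]

lemma rC_cons_space (cs : List Char) (c : Char) : rC ' ' (c :: cs) = c :: rC c cs := by
  simp [rC, gA_space_left]

-- ===== A-side shape lemmas =====

lemma body_eq (cs : List Char) :
    (fun (acc : List Char) (i : Int) =>
      if PySem.List.pyGetD cs i ' ' ≠ ' ' then
        if PySem.Chars.lowerChar (PySem.List.pyGetD cs (i-1) ' ') < PySem.Chars.lowerChar (PySem.List.pyGetD cs i ' ') ∧ PySem.List.pyGetD cs (i-1) ' ' ≠ ' ' then
          acc ++ [PySem.Chars.upperChar (PySem.List.pyGetD cs i ' ')]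
        else if PySem.Chars.lowerChar (PySem.List.pyGetD cs (i-1) ' ') > PySem.Chars.lowerChar (PySem.List.pyGetD cs i ' ') ∧ PySem.List.pyGetD cs (i-1) ' ' ≠ ' ' then
          acc ++ [PySem.Chars.lowerChar (PySem.List.pyGetD cs i ' ')]
        else if PySem.Chars.lowerChar (PySem.List.pyGetD cs (i-1) ' ') = PySem.Chars.lowerChar (PySem.List.pyGetD cs i ' ') ∧ PySem.List.pyGetD cs (i-1) ' ' ≠ ' ' then
          acc ++ [PySem.List.pyGetD cs i ' ']
        else
          acc ++ [PySem.List.pyGetD cs i ' ']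
      else
        acc ++ [PySem.List.pyGetD cs i ' '])
    = (fun acc i => acc ++ [gA (PySem.List.pyGetD cs (i-1) ' ') (PySem.List.pyGetD cs i ' ')]) := by
  funext acc i
  set p := PySem.List.pyGetD cs (i-1) ' '
  set c := PySem.List.pyGetD cs i ' '
  unfold gA twStep
  split_ifs <;> simp_all

lemma range_shape (n : Nat) :
    PySem.List.pyRange 1 ((n + 1 : Nat) : Int) 1 = (List.range n).map (fun (k : Nat) => (1 : Int) + (k : Int)) := by
  unfold PySem.List.pyRange
  rcases Nat.eq_zero_or_pos n with h | h
  · subst h; norm_num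
  · have h1 : (1 : Int) < ((n + 1 : Nat) : Int) := by push_cast; omega
    rw [if_neg (by norm_num), if_pos (by norm_num), if_pos h1]
    have h2 : ((((n + 1 : Nat) : Int) - 1 + 1 - 1) / 1).toNat = n := by push_cast; omega
    rw [h2]
    refine List.map_congr_left fun k _ => ?_
    ring

lemma mapg' : ∀ (rest : List Char) (c0 : Char),
    (List.range rest.length).map (fun (k : Nat) => gA ((c0 :: rest).getD k ' ') (rest.getD k ' '))
      = rC c0 rest := by
  intro rest
  induction rest with
  | nil => intro c0; simp [rC]
  | cons r0 rest' ih =>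
    intro c0
    rw [List.length_cons, List.range_succ_eq_map, List.map_cons, List.map_map]
    have htail : ((List.range rest'.length).map
        ((fun (k : Nat) => gA ((c0 :: r0 :: rest').getD k ' ') ((r0 :: rest').getD k ' ')) ∘ Nat.succ))
        = (List.range rest'.length).map
          (fun (k : Nat) => gA ((r0 :: rest').getD k ' ') (rest'.getD k ' ')) := by
      refine List.map_congr_left fun k _ => ?_
      simp [Function.comp]
    rw [htail, ih r0]
    rfl

lemma mapg (rest : List Char) (c0 : Char) :
    (List.range rest.length).map
      (fun (k : Nat) => gA (PySem.List.pyGetD (c0 :: rest) ((1 : Int) + (k : Int) - 1) ' ')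
                   (PySem.List.pyGetD (c0 :: rest) ((1 : Int) + (k : Int)) ' ')) = rC c0 rest := by
  rw [← mapg' rest c0]
  refine List.map_congr_left fun k _ => ?_
  have e3 : (1 : Int) + (k : Int) - 1 = ((k : Nat) : Int) := by ring
  have e4 : (1 : Int) + (k : Int) = ((k + 1 : Nat) : Int) := by push_cast; ring
  rw [e3, e4, PySem.List.pyGetD_natCast, PySem.List.pyGetD_natCast, List.getD_cons_succ]

lemma transformSentence_eq (sentence : String) (c0 : Char) (rest : List Char)
    (h : sentence.toList = c0 :: rest) :
    transformSentence sentence = String.ofList (c0 :: rC c0 rest) := by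
  have hget : PySem.List.pyGet? (c0 :: rest) 0 = some c0 := by
    simp [PySem.List.pyGet?, PySem.List.pyIdx?]
  unfold transformSentence
  rw [h]
  dsimp only
  rw [hget]
  dsimp only
  rw [body_eq (c0 :: rest), PySem.List.foldl_append_singleton_eq_map]
  rw [show ((c0 :: rest).length : Int) = ((rest.length + 1 : Nat) : Int) by simp]
  rw [range_shape rest.length, List.map_map]
  rw [show ((fun (i : Int) => gA (PySem.List.pyGetD (c0 :: rest) (i - 1) ' ')
        (PySem.List.pyGetD (c0 :: rest) i ' ')) ∘ (fun (k : Nat) => (1 : Int) + (k : Int)))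
      = (fun (k : Nat) => gA (PySem.List.pyGetD (c0 :: rest) ((1 : Int) + (k : Int) - 1) ' ')
        (PySem.List.pyGetD (c0 :: rest) ((1 : Int) + (k : Int)) ' ')) from rfl]
  rw [mapg rest c0]
  rfl

lemma transformSentence_alt_eq (sentence : String) :
    transformSentence_alt sentence = String.ofList (rC ' ' sentence.toList) := by
  unfold transformSentence_alt
  rw [splitOn_eq_sp, (main_lemma sentence.toList).1]

-- ===== VERDICT (by name: the statement is the Claim_ definition above) =====
theorem transformSentence_spec : Claim_equal_transformSentence := by
  unfold Claim_equal_transformSentence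
  intro sentence _ hpre
  unfold Spec_transformSentence
  cases h : sentence.toList with
  | nil =>
    exfalso
    apply hpre
    have h2 := congrArg String.ofList h
    rw [String.ofList_toList] at h2
    exact h2
  | cons c0 rest =>
    rw [transformSentence_eq sentence c0 rest h, transformSentence_alt_eq, h, rC_cons_space]
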